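-- pv_equiv track=rewrite | github.com/Allreality/midnight-knowledge-agent | add_headers.py | extract_metadata_from_content
-- ===== SOURCE A (Python) =====
-- def extract_metadata_from_content(content):
--     """Try to extract metadata from existing content"""
--     lines = content.split('\n')
--
--     # Check if header already exists
--     if lines and lines[0].startswith('---'):
--         # Header might already exist
--         end_index = -1
--         for i, line in enumerate(lines[1:], 1):
--             if line.strip() == '---':
--                 end_index = i
--                 break
--         if end_index > 0:
--             return True, None  # Header exists
--
--     # Try to find title from first heading
--     title = None
--     for line in lines:
--         if line.startswith('# '):
--             title = line[2:].strip()
--             break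
--
--     return False, title
-- ===== SOURCE B (Python) =====
-- def extract_metadata_from_content(content):
--     """Try to extract metadata from existing content (single pass over the lines)."""
--     lines = content.split('\n')
--     has_close = False
--     title = None
--     for i, line in enumerate(lines):
--         if i > 0 and not has_close and line.strip() == '---':
--             has_close = True
--         if title is None and line.startswith('# '):
--             title = line[2:].strip()
--     if lines[0].startswith('---') and has_close:
--         return True, None
--     return False, title
-- ===== Notes on version B (the rewrite author's own statement) =====
-- stated objective: alternative
-- what changed: Replaces A's two separate early-exit scans (one for the closing fence over lines[1:], one for the first heading) by a single pass over all lines that maintains both facts at once, deciding the header question only after the loop.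
import Mathlib
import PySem

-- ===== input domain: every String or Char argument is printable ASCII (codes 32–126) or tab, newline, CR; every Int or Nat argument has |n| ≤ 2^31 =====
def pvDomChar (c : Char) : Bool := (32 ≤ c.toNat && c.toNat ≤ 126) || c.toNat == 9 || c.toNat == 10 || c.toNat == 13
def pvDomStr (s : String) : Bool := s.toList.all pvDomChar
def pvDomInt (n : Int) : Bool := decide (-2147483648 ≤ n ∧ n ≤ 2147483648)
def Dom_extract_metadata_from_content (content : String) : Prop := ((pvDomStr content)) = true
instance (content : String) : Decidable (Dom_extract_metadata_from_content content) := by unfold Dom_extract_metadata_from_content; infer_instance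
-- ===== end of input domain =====

-- B replaces A's two early-exit scans by one pass over all lines maintaining both facts (objective: alternative).


-- ===== PORT A =====
-- the 'for i, line in enumerate(lines[1:], 1): if line.strip()=='---': end_index=i; break' loop (-1 if no break)
def aFindFence : List String → Nat → Int
  | [], _ => -1
  | l :: ls, i => if PySem.Str.strip l == "---" then (i : Int) else aFindFence ls (i + 1)

-- the 'for line in lines: if line.startswith('# '): title=line[2:].strip(); break' loop
def aFindTitle : List String → Option String
  | [] => none
  | l :: ls =>
    if PySem.Str.startswith l "# " then some (PySem.Str.strip (PySem.Str.slice l (some 2) none))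
    else aFindTitle ls

def extract_metadata_from_content (content : String) : Bool × Option String :=
  let lines := (PySem.Str.split? content "\n").getD []   -- sep ≠ "", so split? is always some
  let headerExists :=
    match lines with
    | [] => false            -- 'if lines and …' : empty list short-circuits
    | l0 :: rest => PySem.Str.startswith l0 "---" && decide (aFindFence rest 1 > 0)
  if headerExists then (true, none)
  else (false, aFindTitle lines)

-- ===== PORT B =====
-- the single 'for i, line in enumerate(lines)' loop carrying (has_close, title)
def bLoop : List String → Nat → Bool → Option String → Bool × Option String
  | [], _, hc, t => (hc, t)
  | l :: ls, i, hc, t =>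
    let hc' := if decide (0 < i) && !hc && (PySem.Str.strip l == "---") then true else hc
    let t' := if t.isNone && PySem.Str.startswith l "# " then some (PySem.Str.strip (PySem.Str.slice l (some 2) none)) else t
    bLoop ls (i + 1) hc' t'

def extract_metadata_from_content_alt (content : String) : Bool × Option String :=
  let lines := (PySem.Str.split? content "\n").getD []   -- sep ≠ "", so split? is always some
  let r := bLoop lines 0 false none
  -- lines[0]: str.split never yields an empty list, so the default is unreachable
  if PySem.Str.startswith (lines.headD "") "---" && r.1 then (true, none)
  else (false, r.2)

-- ===== PRECONDITION & SPEC =====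
def Spec_extract_metadata_from_content (content : String) (out : Bool × Option String) : Prop := out = extract_metadata_from_content_alt content
instance (content : String) (out : Bool × Option String) : Decidable (Spec_extract_metadata_from_content content out) := by unfold Spec_extract_metadata_from_content; infer_instance

-- ===== CLAIM (what is proved, stated in full; the proofs are below) =====
def Claim_equal_extract_metadata_from_content : Prop := ∀ (content : String), Dom_extract_metadata_from_content content → Spec_extract_metadata_from_content content (extract_metadata_from_content content)

-- ===== LEMMAS AND PROOFS =====

theorem bLoop_snd (ls : List String) : ∀ (i : Nat) (hc : Bool) (t : Option String),
    (bLoop ls i hc t).2 = (match t with | some v => some v | none => aFindTitle ls) := by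
  induction ls with
  | nil => intro i hc t; cases t <;> simp [bLoop, aFindTitle]
  | cons l ls ih =>
    intro i hc t
    cases t with
    | some v => simp [bLoop, ih]
    | none =>
      cases h : PySem.Chars.startswith l.toList ['#', ' '] <;>
        simp [bLoop, aFindTitle, h, ih]

theorem bLoop_fst (ls : List String) : ∀ (i : Nat) (hc : Bool) (t : Option String), 1 ≤ i →
    (bLoop ls i hc t).1 = (hc || ls.any (fun l => PySem.Str.strip l == "---")) := by
  induction ls with
  | nil => intro i hc t _; simp [bLoop]
  | cons l ls ih =>
    intro i hc t hi
    have h0 : decide (0 < i) = true := by simpa using Nat.lt_of_lt_of_le Nat.zero_lt_one hi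
    by_cases h : (PySem.Str.strip l == "---") = true <;>
      cases hc <;>
        simp [bLoop, h0, h, ih _ _ _ (Nat.le_succ_of_le hi)]

theorem aFindFence_pos (ls : List String) : ∀ (i : Nat), 1 ≤ i →
    decide (aFindFence ls i > 0) = ls.any (fun l => PySem.Str.strip l == "---") := by
  induction ls with
  | nil => intro i _; simp [aFindFence]
  | cons l ls ih =>
    intro i hi
    by_cases h : (PySem.Str.strip l == "---") = true
    · simp [aFindFence, h]; omega
    · simp [aFindFence, h, ih _ (Nat.le_succ_of_le hi)]

-- ===== VERDICT (by name: the statement is the Claim_ definition above) =====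
theorem extract_metadata_from_content_spec : Claim_equal_extract_metadata_from_content := by
  intro content _
  unfold Spec_extract_metadata_from_content extract_metadata_from_content extract_metadata_from_content_alt
  cases hl : (PySem.Str.split? content "\n").getD [] with
  | nil => simp [bLoop, aFindTitle]
  | cons l0 rest =>
    cases hs : PySem.Chars.startswith l0.toList ['#', ' '] <;>
      simp [bLoop, hs, bLoop_snd, bLoop_fst _ _ _ _ (le_refl 1), aFindFence_pos _ _ (le_refl 1),
        aFindTitle, List.headD]
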